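-- pv_equiv track=rewrite | github.com/woody-hulse/projects | 2022/analysis-for-twitter-wip/handler.py | removeBlankHashtags
-- ===== SOURCE A (Python) =====
-- def removeBlankHashtags(hashtags):
--     for hashtagIndex in range(len(hashtags)):
--
--         if hashtagIndex >= len(hashtags):
--             continue
--
--         if hashtags[hashtagIndex] == "" or hashtags[hashtagIndex] == " " or hashtags[hashtagIndex] == "#":
--             replaceValue = ""
--             for hashtagShiftIndex in range(len(hashtags) - 1, hashtagIndex - 1, -1):
--                 tempReplaceValue = hashtags[hashtagShiftIndex]
--                 hashtags[hashtagShiftIndex] = replaceValue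
--                 replaceValue = tempReplaceValue
--             hashtags = hashtags[:len(hashtags) - 1]
--
--     hashtags.append("#")
--
--     return hashtags
-- ===== SOURCE B (Python) =====
-- def removeBlankHashtags(hashtags):
--     # Single pass over the original list: a blank tag ("", " " or "#")
--     # is dropped and the element right after it is kept unexamined (the
--     # remove-then-skip-next-index semantics), then "#" is appended.
--     out = []
--     i = 0
--     n = len(hashtags)
--     while i < n:
--         x = hashtags[i]
--         if x == "" or x == " " or x == "#":
--             if i + 1 < n:
--                 out.append(hashtags[i + 1])
--             i += 2
--         else:
--             out.append(x)
--             i += 1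
--     out.append("#")
--     return out
-- ===== Notes on version B (the rewrite author's own statement) =====
-- stated objective: alternative
-- what changed: A deletes each blank tag in place by a shift-left-and-truncate pass inside the scan (quadratic in the worst case); B never mutates and is a single pass that emits kept elements directly, reproducing A's remove-then-skip-next-index semantics.
import Mathlib
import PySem

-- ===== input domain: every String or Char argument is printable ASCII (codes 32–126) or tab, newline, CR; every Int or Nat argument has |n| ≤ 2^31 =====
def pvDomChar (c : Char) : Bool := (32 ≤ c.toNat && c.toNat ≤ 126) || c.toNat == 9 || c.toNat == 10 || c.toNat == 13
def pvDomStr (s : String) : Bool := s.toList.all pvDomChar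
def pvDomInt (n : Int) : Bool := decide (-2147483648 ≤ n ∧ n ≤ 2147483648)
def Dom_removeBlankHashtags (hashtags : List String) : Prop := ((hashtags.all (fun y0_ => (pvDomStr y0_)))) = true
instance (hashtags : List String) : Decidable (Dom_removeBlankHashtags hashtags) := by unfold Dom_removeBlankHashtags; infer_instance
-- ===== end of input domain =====

-- B replaces A's in-place shift-and-truncate deletion loop with a single pass that
-- builds the output directly, reproducing A's remove-then-skip-next-index semantics
-- exactly (return value only: A may also mutate its argument in place, B never does).

-- ===== PORT A =====
-- inner shift loop body: temp = hashtags[j]; hashtags[j] = replaceValue; replaceValue = temp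
def pvShiftStep (st : List String × String) (j : Int) : List String × String :=
  let temp := PySem.List.pyGetD st.1 j ""
  (PySem.List.pySetD st.1 j st.2, temp)

-- one outer-loop iteration of A
def pvStepA (hs : List String) (idx : Int) : List String :=
  if (hs.length : Int) ≤ idx then hs
  else if PySem.List.pyGetD hs idx "" = "" ∨ PySem.List.pyGetD hs idx "" = " "
          ∨ PySem.List.pyGetD hs idx "" = "#" then
    let p := (PySem.List.pyRange ((hs.length : Int) - 1) (idx - 1) (-1)).foldl pvShiftStep (hs, "")
    PySem.List.slice p.1 none (some ((p.1.length : Int) - 1))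
  else hs

def removeBlankHashtags (hashtags : List String) : List String :=
  ((PySem.List.pyRange 0 (hashtags.length : Int) 1).foldl pvStepA hashtags) ++ ["#"]

-- ===== PORT B =====
-- the while loop of Source B: index i over the original list
def pvAltGo (hs : List String) (n i : Nat) : List String :=
  if i < n then
    let x := PySem.List.pyGetD hs (i : Int) ""
    if x = "" ∨ x = " " ∨ x = "#" then
      (if i + 1 < n then [PySem.List.pyGetD hs ((i + 1 : Nat) : Int) ""] else [])
        ++ pvAltGo hs n (i + 2)
    else x :: pvAltGo hs n (i + 1)
  else []
termination_by n - i

def removeBlankHashtags_alt (hashtags : List String) : List String :=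
  pvAltGo hashtags hashtags.length 0 ++ ["#"]

-- ===== PRECONDITION & SPEC =====
def Spec_removeBlankHashtags (hashtags : List String) (out : List String) : Prop := out = removeBlankHashtags_alt hashtags
instance (hashtags : List String) (out : List String) : Decidable (Spec_removeBlankHashtags hashtags out) := by unfold Spec_removeBlankHashtags; infer_instance

-- ===== CLAIM (what is proved, stated in full; the proofs are below) =====
def Claim_equal_removeBlankHashtags : Prop := ∀ (hashtags : List String), Dom_removeBlankHashtags hashtags → Spec_removeBlankHashtags hashtags (removeBlankHashtags hashtags)

-- ===== LEMMAS AND PROOFS =====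

-- common functional specification: drop a blank, keep the next element unexamined
def pvGo : List String → List String
  | [] => []
  | x :: rest =>
    if x = "" ∨ x = " " ∨ x = "#" then
      match rest with
      | [] => []
      | y :: r => y :: pvGo r
    else x :: pvGo rest

theorem pvGo_cons_nonblank (x : String) (rest : List String)
    (h : ¬(x = "" ∨ x = " " ∨ x = "#")) : pvGo (x :: rest) = x :: pvGo rest := by
  cases rest <;> simp [pvGo, h]

theorem pvGetD_app (pre : List String) (x : String) (tail : List String) (d : String) :
    (pre ++ x :: tail).getD pre.length d = x := by
  induction pre with
  | nil => rfl
  | cons a l ih => simpa using ih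

theorem pvSet_app (pre : List String) (x v : String) (tail : List String) :
    (pre ++ x :: tail).set pre.length v = pre ++ v :: tail := by
  induction pre with
  | nil => rfl
  | cons a l ih => simpa using ih

-- the shift loop rotates rest left past x and plants rv at the end of the scanned range
theorem pvShift_spec (rest : List String) : ∀ (pre : List String) (x : String) (tail : List String) (rv : String),
    (PySem.List.pyRange ((pre.length + rest.length : Nat) : Int) ((pre.length : Int) - 1) (-1)).foldl
        pvShiftStep (pre ++ x :: rest ++ tail, rv)
      = (pre ++ rest ++ rv :: tail, x) := by
  induction rest using List.reverseRecOn with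
  | nil =>
    intro pre x tail rv
    have h1 : ((pre.length + ([] : List String).length : Nat) : Int) = (pre.length : Int) := by simp
    rw [h1, PySem.List.pyRange_neg_one_cons (by omega), PySem.List.pyRange_neg_one_eq_nil (by omega)]
    simp only [List.foldl_cons, List.foldl_nil, pvShiftStep, PySem.List.pyGetD_natCast,
      PySem.List.pySetD_natCast, List.nil_append, List.append_nil]
    simp only [List.append_assoc, List.cons_append, List.nil_append]
    rw [pvGetD_app, pvSet_app]
  | append_singleton r lastv ih =>
    intro pre x tail rv
    rw [PySem.List.pyRange_neg_one_cons (by simp <;> omega)]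
    simp only [List.foldl_cons, pvShiftStep, PySem.List.pyGetD_natCast, PySem.List.pySetD_natCast]
    have hlist : pre ++ x :: (r ++ [lastv]) ++ tail = (pre ++ x :: r) ++ lastv :: tail := by simp
    have hn : pre.length + (r ++ [lastv]).length = (pre ++ x :: r).length := by simp <;> omega
    rw [hlist, hn, pvGetD_app, pvSet_app]
    have hrange : ((((pre ++ x :: r).length : Nat) : Int) - 1) = ((pre.length + r.length : Nat) : Int) := by
      simp <;> push_cast <;> omega
    rw [hrange]
    have := ih pre x (rv :: tail) lastv
    simp only [List.append_assoc, List.cons_append, List.nil_append] at this ⊢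
    rw [this]

-- once the index reaches the (shrunken) length, the rest of A's loop is a no-op
theorem pvStepA_skip (k : Nat) : ∀ (a : Int) (hs : List String), (hs.length : Int) ≤ a →
    (PySem.List.pyRange a (a + k) 1).foldl pvStepA hs = hs := by
  induction k with
  | zero =>
    intro a hs _
    simp [PySem.List.pyRange_one]
  | succ k ih =>
    intro a hs h
    rw [PySem.List.pyRange_one_cons (by omega)]
    simp only [List.foldl_cons]
    have hstep : pvStepA hs a = hs := by unfold pvStepA; rw [if_pos h]
    rw [hstep]
    have harith : a + ((k : Nat) + 1 : Nat) = (a + 1) + (k : Nat) := by push_cast; ring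
    rw [harith]
    exact ih (a + 1) hs (by omega)

-- invariant of A's outer loop
theorem pvA_main (k : Nat) : ∀ (pre suf : List String), suf.length ≤ k →
    (PySem.List.pyRange (pre.length : Int) ((pre.length : Int) + k) 1).foldl pvStepA (pre ++ suf)
      = pre ++ pvGo suf := by
  induction k with
  | zero =>
    intro pre suf h
    have hnil : suf = [] := List.eq_nil_of_length_eq_zero (by omega)
    subst hnil
    simp [PySem.List.pyRange_one, pvGo]
  | succ k ih =>
    intro pre suf h
    cases suf with
    | nil =>
      simpa [pvGo] using pvStepA_skip (k + 1) (pre.length : Int) pre (by omega)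
    | cons x rest =>
      rw [PySem.List.pyRange_one_cons (by push_cast <;> omega)]
      simp only [List.foldl_cons]
      have hget : PySem.List.pyGetD (pre ++ x :: rest) ((pre.length : Nat) : Int) "" = x := by
        rw [PySem.List.pyGetD_natCast, pvGetD_app]
      have hstep : pvStepA (pre ++ x :: rest) (pre.length : Int) =
          (if x = "" ∨ x = " " ∨ x = "#" then pre ++ rest else pre ++ x :: rest) := by
        unfold pvStepA
        rw [if_neg (by simp <;> omega), hget]
        by_cases hb : x = "" ∨ x = " " ∨ x = "#"
        · rw [if_pos hb, if_pos hb]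
          have hrange : (((pre ++ x :: rest).length : Int) - 1) = ((pre.length + rest.length : Nat) : Int) := by
            simp <;> push_cast <;> omega
          rw [hrange]
          have hshift := pvShift_spec rest pre x [] ""
          simp only [List.append_nil] at hshift
          rw [hshift]
          show PySem.List.slice (pre ++ rest ++ [""]) none
              (some (((pre ++ rest ++ [""]).length : Int) - 1)) = pre ++ rest
          have hlen : (((pre ++ rest ++ [""]).length : Int) - 1) =
              ((pre.length + rest.length : Nat) : Int) := by simp <;> push_cast <;> omega
          rw [hlen, PySem.List.slice_to_natCast]
          have hassoc : pre ++ rest ++ [""] = (pre ++ rest) ++ [""] := by simp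
          rw [hassoc, List.take_left' (by simp)]
        · rw [if_neg hb, if_neg hb]
      rw [hstep]
      by_cases hb : x = "" ∨ x = " " ∨ x = "#"
      · rw [if_pos hb]
        cases rest with
        | nil =>
          simp only [List.append_nil]
          have harith : (pre.length : Int) + ((k : Nat) + 1 : Nat) = ((pre.length : Int) + 1) + (k : Nat) := by
            push_cast; ring
          rw [harith, pvStepA_skip k ((pre.length : Int) + 1) pre (by omega)]
          simp [pvGo, hb]
        | cons y r =>
          have hlen2 : (((pre ++ [y]).length : Nat) : Int) = (pre.length : Int) + 1 := by
            push_cast [List.length_append, List.length_cons, List.length_nil]; omega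
          have harith : (pre.length : Int) + ((k : Nat) + 1 : Nat) = (((pre ++ [y]).length : Nat) : Int) + (k : Nat) := by
            rw [hlen2]; push_cast; omega
          have hlist : pre ++ y :: r = (pre ++ [y]) ++ r := by simp
          rw [harith, ← hlen2]
          rw [hlen2, ← hlen2]  -- normalize start to ↑(pre ++ [y]).length
          rw [hlist, ih (pre ++ [y]) r (by simp at h <;> omega)]
          simp [pvGo, hb]
      · rw [if_neg hb]
        have hlen2 : (((pre ++ [x]).length : Nat) : Int) = (pre.length : Int) + 1 := by
          push_cast [List.length_append, List.length_cons, List.length_nil]; omega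
        have harith : (pre.length : Int) + ((k : Nat) + 1 : Nat) = (((pre ++ [x]).length : Nat) : Int) + (k : Nat) := by
          rw [hlen2]; push_cast; omega
        have hlist : pre ++ x :: rest = (pre ++ [x]) ++ rest := by simp
        rw [harith, ← hlen2, hlen2, ← hlen2]
        rw [hlist, ih (pre ++ [x]) rest (by simp at h <;> omega)]
        rw [pvGo_cons_nonblank x rest hb]
        simp

-- invariant of B's while loop
theorem pvB_main (k : Nat) : ∀ (suf pre : List String), suf.length ≤ k →
    pvAltGo (pre ++ suf) (pre.length + suf.length) pre.length = pvGo suf := by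
  induction k with
  | zero =>
    intro suf pre h
    have hnil : suf = [] := List.eq_nil_of_length_eq_zero (by omega)
    subst hnil
    rw [pvAltGo]
    simp [pvGo]
  | succ k ih =>
    intro suf pre h
    cases suf with
    | nil =>
      rw [pvAltGo]; simp [pvGo]
    | cons x rest =>
      rw [pvAltGo]
      have hget : PySem.List.pyGetD (pre ++ x :: rest) ((pre.length : Nat) : Int) "" = x := by
        rw [PySem.List.pyGetD_natCast, pvGetD_app]
      rw [if_pos (by simp only [List.length_cons] <;> omega)]
      simp only [hget]
      by_cases hb : x = "" ∨ x = " " ∨ x = "#"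
      · rw [if_pos hb]
        cases rest with
        | nil =>
          rw [if_neg (by simp only [List.length_cons, List.length_nil] <;> omega), pvAltGo,
            if_neg (by simp only [List.length_cons, List.length_nil] <;> omega)]
          simp [pvGo, hb]
        | cons y r =>
          rw [if_pos (by simp only [List.length_cons] <;> omega)]
          have hget2 : PySem.List.pyGetD (pre ++ x :: y :: r) ((pre.length + 1 : Nat) : Int) "" = y := by
            rw [PySem.List.pyGetD_natCast]
            have h1 : pre ++ x :: y :: r = (pre ++ [x]) ++ y :: r := by simp
            have h2 : pre.length + 1 = (pre ++ [x]).length := by simp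
            rw [h1, h2, pvGetD_app]
          rw [hget2]
          have hlist : pre ++ x :: y :: r = (pre ++ [x, y]) ++ r := by simp
          have hn : pre.length + (x :: y :: r).length = (pre ++ [x, y]).length + r.length := by
            simp <;> omega
          have hi : pre.length + 2 = (pre ++ [x, y]).length := by simp
          rw [hlist, hn, hi, ih r (pre ++ [x, y]) (by simp at h <;> omega)]
          simp [pvGo, hb]
      · rw [if_neg hb]
        have hlist : pre ++ x :: rest = (pre ++ [x]) ++ rest := by simp
        have hn : pre.length + (x :: rest).length = (pre ++ [x]).length + rest.length := by
          simp <;> omega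
        have hi : pre.length + 1 = (pre ++ [x]).length := by simp
        rw [hlist, hn, hi, ih rest (pre ++ [x]) (by simp at h <;> omega)]
        rw [pvGo_cons_nonblank x rest hb]

-- ===== VERDICT (by name: the statement is the Claim_ definition above) =====
theorem removeBlankHashtags_spec : Claim_equal_removeBlankHashtags := by
  intro hs _
  unfold Spec_removeBlankHashtags removeBlankHashtags removeBlankHashtags_alt
  have hA := pvA_main hs.length [] hs (le_refl _)
  have hB := pvB_main hs.length hs [] (le_refl _)
  simp only [List.nil_append, List.length_nil, Nat.cast_zero, Int.zero_add, Nat.zero_add] at hA hB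
  rw [hA, hB]
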